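-- pv_equiv track=rewrite | github.com/init-fun/amazon-coding-assessment-prep | topK/5. kFrequent.py | kFrequent
-- ===== SOURCE A (Python) =====
-- def kFrequent(arr, k):
--     tmp_dict = {}
--     i = 0
--     start = 0
--     len_arr = len(arr)
--     while i < len_arr:
--         if arr[i] not in tmp_dict:
--             tmp_dict[arr[i]] = 0
--         tmp_dict[arr[i]] += 1
--         i += 1
--         while len(tmp_dict) > k:
--             char_to_remove = arr[start]
--             tmp_dict[char_to_remove] -= 1
--             if tmp_dict[char_to_remove] == 0:
--                 del tmp_dict[char_to_remove]
--             start += 1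
--     return list(tmp_dict.keys())
-- ===== SOURCE B (Python) =====
-- def kFrequent(arr, k):
--     # Same sliding window, but no per-key counters: `last` records each value's
--     # most recent index, so the window start can skip every position that is not
--     # its value's last occurrence; the surviving distinct values are kept in an
--     # insertion-ordered dict used as an ordered set.
--     last = {}
--     order = {}
--     h = 0
--     for i, v in enumerate(arr):
--         last[v] = i
--         if v not in order:
--             order[v] = None
--             if len(order) > k:
--                 while last[arr[h]] != h:
--                     h += 1
--                 del order[arr[h]]
--                 h += 1
--     return list(order)
-- ===== Notes on version B (the rewrite author's own statement) =====
-- stated objective: alternative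
-- what changed: B drops A's per-key occurrence counters: it records for each value the index of its last occurrence, advances the window start past every position that is not its value's last occurrence, and keeps the surviving distinct values in an insertion-ordered dict used as an ordered set.
import Mathlib
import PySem

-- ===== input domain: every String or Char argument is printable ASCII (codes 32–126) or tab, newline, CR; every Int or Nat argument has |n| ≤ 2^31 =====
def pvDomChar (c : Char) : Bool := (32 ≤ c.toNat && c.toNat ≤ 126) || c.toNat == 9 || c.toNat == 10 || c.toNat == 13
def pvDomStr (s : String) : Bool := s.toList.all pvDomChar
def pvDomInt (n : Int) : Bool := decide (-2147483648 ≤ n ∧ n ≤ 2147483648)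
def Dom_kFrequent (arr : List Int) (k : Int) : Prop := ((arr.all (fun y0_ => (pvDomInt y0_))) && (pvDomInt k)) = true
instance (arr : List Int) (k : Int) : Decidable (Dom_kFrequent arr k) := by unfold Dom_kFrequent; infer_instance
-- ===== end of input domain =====

-- B replaces A's per-key counters by a last-occurrence-index dict: the window start is
-- advanced past every position that is not its value's last occurrence, and the surviving
-- distinct values live in an insertion-ordered dict used as a set (objective: alternative).

-- ===== PORT A =====
-- inner `while len(tmp_dict) > k:` loop; the `none` match arms are where Python raises
-- (IndexError on arr[start], KeyError on tmp_dict[char_to_remove]) — outside Pre_.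
def kFrequentShrink (arr : List Int) (k : Int) (start : Nat) (d : PySem.Dict Int Int) :
    Nat × PySem.Dict Int Int :=
  if (d.size : Int) > k then
    match hg : PySem.List.pyGet? arr (start : Int) with
    | none => (start, d)      -- IndexError
    | some u =>
      match d.get? u with
      | none => (start, d)    -- KeyError
      | some c =>
        let d1 := d.insert u (c - 1)
        let d2 := if c - 1 = 0 then d1.erase u else d1
        kFrequentShrink arr k (start + 1) d2
  else (start, d)
termination_by arr.length - start
decreasing_by
  have : start < arr.length := by
    rw [PySem.List.pyGet?_natCast] at hg
    exact (List.getElem?_eq_some_iff.mp hg).1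
  omega

-- outer `while i < len_arr:` loop
def kFrequentLoop (arr : List Int) (k : Int) (i start : Nat) (d : PySem.Dict Int Int) :
    PySem.Dict Int Int :=
  if h : i < arr.length then
    let v := arr[i]
    let d0 := if d.contains v then d else d.insert v 0
    let d1 := match d0.get? v with
      | some c => d0.insert v (c + 1)
      | none => d0            -- unreachable: the key was just ensured present
    let p := kFrequentShrink arr k start d1
    kFrequentLoop arr k (i + 1) p.1 p.2
  else d
termination_by arr.length - i

def kFrequent (arr : List Int) (k : Int) : List Int :=
  (kFrequentLoop arr k 0 0 PySem.Dict.empty).keys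

-- ===== PORT B =====
-- `while last[arr[h]] != h: h += 1` — advances the window start to the first position
-- holding the last occurrence of its value; the `none` arms are where Python would
-- raise (IndexError/KeyError), both unreachable.
def kFrequentAdvance (arr : List Int) (last : PySem.Dict Int Int) (h : Nat) : Nat :=
  match hg : PySem.List.pyGet? arr (h : Int) with
  | none => h            -- IndexError
  | some u =>
    match last.get? u with
    | none => h          -- KeyError
    | some j => if j ≠ (h : Int) then kFrequentAdvance arr last (h + 1) else h
termination_by arr.length - h
decreasing_by
  have : h < arr.length := by
    rw [PySem.List.pyGet?_natCast] at hg
    exact (List.getElem?_eq_some_iff.mp hg).1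
  omega

def kFrequentStep (arr : List Int) (k : Int)
    (st : PySem.Dict Int Int × PySem.Dict Int (Option Int) × Nat) (iv : Int × Int) :
    PySem.Dict Int Int × PySem.Dict Int (Option Int) × Nat :=
  let last := st.1.insert iv.2 iv.1
  if st.2.1.contains iv.2 then (last, st.2.1, st.2.2)
  else
    let order := st.2.1.insert iv.2 none    -- order[v] = None
    if (order.size : Int) > k then
      let h := kFrequentAdvance arr last st.2.2
      match PySem.List.pyGet? arr (h : Int) with
      | none => (last, order, h)            -- IndexError (unreachable)
      | some u => (last, order.erase u, h + 1)   -- del order[arr[h]]; h += 1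
    else (last, order, st.2.2)

def kFrequent_alt (arr : List Int) (k : Int) : List Int :=
  ((PySem.List.enumerate arr).foldl (kFrequentStep arr k)
    (PySem.Dict.empty, PySem.Dict.empty, 0)).2.1.keys

-- ===== PRECONDITION & SPEC =====
-- On k < 0 with nonempty arr, A raises (KeyError/IndexError while shrinking past an
-- empty dict); those inputs are excluded.  A returns normally everywhere else.
def Pre_kFrequent (arr : List Int) (k : Int) : Prop := arr = [] ∨ 0 ≤ k
instance (arr : List Int) (k : Int) : Decidable (Pre_kFrequent arr k) := by
  unfold Pre_kFrequent; infer_instance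
def pvWitness_kFrequent : List Int × Int := ([1, 2, 1, 3], 2)

def Spec_kFrequent (arr : List Int) (k : Int) (out : List Int) : Prop := out = kFrequent_alt arr k
instance (arr : List Int) (k : Int) (out : List Int) : Decidable (Spec_kFrequent arr k out) := by
  unfold Spec_kFrequent; infer_instance

-- ===== CLAIM (what is proved, stated in full; the proofs are below) =====
def Claim_equal_kFrequent : Prop := ∀ (arr : List Int) (k : Int), Dom_kFrequent arr k → Pre_kFrequent arr k → Spec_kFrequent arr k (kFrequent arr k)

-- ===== LEMMAS AND PROOFS =====

-- proof-side model of one eviction: pop the window's front until an element with no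
-- later copy in the window falls off; returns the remaining window and that element
def kFrequentEvict : List Int → List Int × Int
  | [] => ([], 0)
  | u :: rest => if rest.contains u then kFrequentEvict rest else (rest, u)

-- the items list of A's dict: the window's distinct values in insertion order, with counts
def CntItems (order window : List Int) : List (Int × Int) :=
  order.map (fun x => (x, (window.count x : Int)))

lemma cnt_keys (order window : List Int) :
    (PySem.Dict.mk (CntItems order window)).keys = order := by
  simp only [PySem.Dict.keys, CntItems, List.map_map, Function.comp_def, List.map_id']

lemma cnt_contains_true {order : List Int} (window : List Int) {v : Int} (hv : v ∈ order) :
    (PySem.Dict.mk (CntItems order window)).contains v = true := by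
  simp only [PySem.Dict.contains, CntItems, List.any_map, List.any_eq_true]
  exact ⟨v, hv, by simp⟩

lemma cnt_get? {order : List Int} (window : List Int) {v : Int}
    (hnd : order.Nodup) (hv : v ∈ order) :
    (PySem.Dict.mk (CntItems order window)).get? v = some ((window.count v : Int)) := by
  apply PySem.Dict.get?_of_mem_items
  · exact List.mem_map.mpr ⟨v, hv, rfl⟩
  · rw [cnt_keys]; exact hnd

lemma cnt_size (order window : List Int) :
    (PySem.Dict.mk (CntItems order window)).size = order.length := by
  simp [PySem.Dict.size, CntItems]

lemma cnt_insert {order : List Int} (window : List Int) {v : Int} (hv : v ∈ order) (c : Int) :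
    (PySem.Dict.mk (CntItems order window)).insert v c =
      PySem.Dict.mk (order.map (fun x => if x = v then (v, c) else (x, (window.count x : Int)))) := by
  apply PySem.Dict.ext
  rw [PySem.Dict.items_insert_of_contains _ _ (cnt_contains_true window hv)]
  simp only [CntItems, List.map_map]
  refine List.map_congr_left fun x _ => ?_
  by_cases h : x = v <;> simp [h]

lemma evict_len_le : ∀ (w : List Int), (kFrequentEvict w).1.length ≤ w.length := by
  intro w
  induction w with
  | nil => simp [kFrequentEvict]
  | cons u w ih =>
    rw [kFrequentEvict]
    split
    · exact Nat.le_trans ih (Nat.le_succ _)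
    · simp

lemma shrink_sim (arr rest : List Int) (k : Int) (hk : 0 ≤ k) :
    ∀ (order window : List Int) (start : Nat),
    arr.drop start = window ++ rest →
    ((order.length : Int) = k + 1) →
    order.Nodup →
    (∀ x ∈ window, x ∈ order) →
    (∀ x ∈ order, 0 < window.count x) →
    kFrequentShrink arr k start ⟨CntItems order window⟩ =
      (start + (window.length - (kFrequentEvict window).1.length),
       ⟨CntItems (order.erase (kFrequentEvict window).2) (kFrequentEvict window).1⟩)
    ∧ arr.drop (start + (window.length - (kFrequentEvict window).1.length)) =
        (kFrequentEvict window).1 ++ rest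
    ∧ (kFrequentEvict window).2 ∈ order
    ∧ (∀ x ∈ (kFrequentEvict window).1, x ∈ order.erase (kFrequentEvict window).2)
    ∧ (∀ x ∈ order.erase (kFrequentEvict window).2, 0 < (kFrequentEvict window).1.count x) := by
  intro order window
  induction window with
  | nil =>
    intro start hdrop hlen hnd hsub hpos
    exfalso
    cases order with
    | nil => simp at hlen; omega
    | cons x o => simpa using hpos x (List.mem_cons_self ..)
  | cons u w ih =>
    intro start hdrop hlen hnd hsub hpos
    have hu : u ∈ order := hsub u (List.mem_cons_self ..)
    have hget : PySem.List.pyGet? arr (start : Int) = some u := by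
      rw [PySem.List.pyGet?_natCast]
      have h0 : (arr.drop start)[0]? = some u := by rw [hdrop]; rfl
      rwa [List.getElem?_drop, Nat.add_zero] at h0
    have hdrop' : arr.drop (start + 1) = w ++ rest := by
      have h1 : (arr.drop start).drop 1 = arr.drop (start + 1) := by
        rw [List.drop_drop]
      rw [← h1, hdrop]
      rfl
    have hsize : (((PySem.Dict.mk (CntItems order (u :: w))).size : Int)) > k := by
      rw [cnt_size]; omega
    have hq : (PySem.Dict.mk (CntItems order (u :: w))).get? u
        = some ((List.count u (u :: w) : Int)) := cnt_get? _ hnd hu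
    have hcw : ((List.count u (u :: w) : Int) - 1) = (List.count u w : Int) := by
      rw [List.count_cons_self]; push_cast; ring
    have hins : (PySem.Dict.mk (CntItems order (u :: w))).insert u
          ((List.count u (u :: w) : Int) - 1) = PySem.Dict.mk (CntItems order w) := by
      rw [cnt_insert _ hu]
      unfold CntItems
      refine congrArg _ (List.map_congr_left fun x hx => ?_)
      by_cases hxu : x = u
      · subst hxu
        rw [if_pos rfl, hcw]
      · rw [if_neg hxu, List.count_cons, if_neg (by simp [Ne.symm hxu])]
        simp
    by_cases hmem : u ∈ w
    · -- the popped value still occurs in the window: count decremented, no deletion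
      have hpw : 0 < List.count u w := List.count_pos_iff.mpr hmem
      have hne : ((List.count u (u :: w) : Int) - 1) ≠ 0 := by rw [hcw]; omega
      have hstep : kFrequentShrink arr k start ⟨CntItems order (u :: w)⟩
          = kFrequentShrink arr k (start + 1) ⟨CntItems order w⟩ := by
        rw [kFrequentShrink, if_pos hsize]
        split
        · next h => rw [hget] at h; cases h
        · next u' h =>
          rw [hget] at h
          injection h with h
          subst h
          rw [hq]
          simp only [if_neg hne]
          rw [hins]
      have hev : kFrequentEvict (u :: w) = kFrequentEvict w := by
        rw [kFrequentEvict, if_pos (by simpa using hmem)]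
      have hpos' : ∀ x ∈ order, 0 < List.count x w := by
        intro x hx
        by_cases hxu : x = u
        · subst hxu; exact hpw
        · have := hpos x hx
          rwa [List.count_cons, if_neg (by simp [Ne.symm hxu]), Nat.add_zero] at this
      obtain ⟨e1, e2, e3, e4, e5⟩ := ih (start + 1) hdrop' hlen hnd
        (fun x hx => hsub x (List.mem_cons_of_mem _ hx)) hpos'
      have hle := evict_len_le w
      have harith : start + ((u :: w).length - (kFrequentEvict w).1.length)
          = start + 1 + (w.length - (kFrequentEvict w).1.length) := by
        simp only [List.length_cons]; omega
      refine ⟨?_, ?_, ?_, ?_, ?_⟩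
      · rw [hstep, e1, hev, harith]
      · rw [hev, harith]; exact e2
      · rw [hev]; exact e3
      · rw [hev]; exact e4
      · rw [hev]; exact e5
    · -- last copy of the popped value: its count hits 0 and the key is deleted
      have hz : ((List.count u (u :: w) : Int) - 1) = 0 := by
        rw [hcw, List.count_eq_zero_of_not_mem hmem]; rfl
      have herase : (PySem.Dict.mk (CntItems order w)).erase u
          = PySem.Dict.mk (CntItems (order.erase u) w) := by
        apply PySem.Dict.ext
        simp only [PySem.Dict.erase, CntItems]
        rw [List.filter_map, List.Nodup.erase_eq_filter hnd]
        congr 1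
      have hstep : kFrequentShrink arr k start ⟨CntItems order (u :: w)⟩
          = kFrequentShrink arr k (start + 1) ⟨CntItems (order.erase u) w⟩ := by
        rw [kFrequentShrink, if_pos hsize]
        split
        · next h => rw [hget] at h; cases h
        · next u' h =>
          rw [hget] at h
          injection h with h
          subst h
          rw [hq]
          simp only [if_pos hz]
          rw [hins, herase]
      have hterm : kFrequentShrink arr k (start + 1) ⟨CntItems (order.erase u) w⟩
          = (start + 1, ⟨CntItems (order.erase u) w⟩) := by
        rw [kFrequentShrink, if_neg]
        rw [cnt_size]
        have := List.length_erase_of_mem hu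
        have h1 : 1 ≤ order.length := List.length_pos_of_mem hu
        omega
      have hev : kFrequentEvict (u :: w) = (w, u) := by
        rw [kFrequentEvict, if_neg (by simpa using hmem)]
      refine ⟨?_, ?_, ?_, ?_, ?_⟩
      · rw [hstep, hterm, hev]
        simp only [List.length_cons]
        congr 2
        omega
      · rw [hev]
        simpa only [List.length_cons, Nat.succ_sub (Nat.le_refl _), Nat.sub_self] using hdrop'
      · rw [hev]; exact hu
      · rw [hev]
        intro x hx
        have hx' : x ∈ w := hx
        exact (List.Nodup.mem_erase_iff hnd).mpr
          ⟨fun he => hmem ((show x = u from he) ▸ hx'), hsub x (List.mem_cons_of_mem _ hx')⟩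
      · rw [hev]
        intro x hx
        obtain ⟨hxu, hxo⟩ := (List.Nodup.mem_erase_iff hnd).mp hx
        have := hpos x hxo
        rwa [List.count_cons, if_neg (by simp [Ne.symm hxu]), Nat.add_zero] at this

lemma cnt_contains_false {order : List Int} (window : List Int) {v : Int} (hv : v ∉ order) :
    (PySem.Dict.mk (CntItems order window)).contains v = false := by
  simp only [PySem.Dict.contains, CntItems, List.any_map, List.any_eq_false, Function.comp_def]
  exact fun x hx h => hv ((eq_of_beq h) ▸ hx)

lemma cnt_insert_succ {order : List Int} (window : List Int) {v : Int} (hv : v ∈ order) :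
    (PySem.Dict.mk (CntItems order window)).insert v ((window.count v : Int) + 1) =
      PySem.Dict.mk (CntItems order (window ++ [v])) := by
  rw [cnt_insert _ hv]
  unfold CntItems
  refine congrArg _ (List.map_congr_left fun x hx => ?_)
  by_cases hxu : x = v
  · subst hxu
    rw [if_pos rfl, List.count_append, show List.count x [x] = 1 from by simp]
    simp only [Prod.mk.injEq, true_and]
    push_cast
    ring
  · rw [if_neg hxu, List.count_append,
      show List.count x [v] = 0 from List.count_eq_zero.mpr (by simpa using hxu), Nat.add_zero]

lemma shrink_noop (arr : List Int) (k : Int) (start : Nat) (d : PySem.Dict Int Int)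
    (h : ¬ ((d.size : Int) > k)) : kFrequentShrink arr k start d = (start, d) := by
  rw [kFrequentShrink, if_neg h]

-- the items list of B's `order` dict (an insertion-ordered set: every value is None)
def OItems (order : List Int) : List (Int × Option Int) :=
  order.map (fun x => (x, (none : Option Int)))

lemma okeys (order : List Int) : (PySem.Dict.mk (OItems order)).keys = order := by
  simp only [PySem.Dict.keys, OItems, List.map_map, Function.comp_def, List.map_id']

lemma ocontains_true {order : List Int} {v : Int} (hv : v ∈ order) :
    (PySem.Dict.mk (OItems order)).contains v = true := by
  simp only [PySem.Dict.contains, OItems, List.any_map, List.any_eq_true]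
  exact ⟨v, hv, by simp⟩

lemma ocontains_false {order : List Int} {v : Int} (hv : v ∉ order) :
    (PySem.Dict.mk (OItems order)).contains v = false := by
  simp only [PySem.Dict.contains, OItems, List.any_map, List.any_eq_false, Function.comp_def]
  exact fun x hx h => hv ((eq_of_beq h) ▸ hx)

lemma osize (order : List Int) : (PySem.Dict.mk (OItems order)).size = order.length := by
  simp [PySem.Dict.size, OItems]

lemma oinsert {order : List Int} {v : Int} (hv : v ∉ order) :
    (PySem.Dict.mk (OItems order)).insert v none = PySem.Dict.mk (OItems (order ++ [v])) := by
  apply PySem.Dict.ext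
  rw [PySem.Dict.items_insert_of_not_contains _ _ (ocontains_false hv)]
  simp [OItems]

lemma oerase {order : List Int} (hnd : order.Nodup) (u : Int) :
    (PySem.Dict.mk (OItems order)).erase u = PySem.Dict.mk (OItems (order.erase u)) := by
  apply PySem.Dict.ext
  simp only [PySem.Dict.erase, OItems]
  rw [List.filter_map, List.Nodup.erase_eq_filter hnd]
  congr 1

-- B's `last` dict holds, for each value, the index of its last occurrence in arr[:L]
def LInv (arr : List Int) (last : PySem.Dict Int Int) (L : Nat) : Prop :=
  ∀ (v j : Int), last.get? v = some j ↔
    ∃ jn : Nat, j = (jn : Int) ∧ jn < L ∧ arr[jn]? = some v ∧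
      ∀ m : Nat, jn < m → m < L → arr[m]? ≠ some v

lemma LInv_empty (arr : List Int) : LInv arr PySem.Dict.empty 0 := by
  intro v j
  constructor
  · intro h
    rw [PySem.Dict.get?_empty] at h
    cases h
  · rintro ⟨jn, _, h, _⟩
    omega

lemma LInv_insert {arr : List Int} {last : PySem.Dict Int Int} {L : Nat} {v : Int}
    (hL : arr[L]? = some v) (h : LInv arr last L) :
    LInv arr (last.insert v (L : Int)) (L + 1) := by
  intro w j
  rw [PySem.Dict.get?_insert]
  by_cases hwv : w = v
  · subst hwv
    rw [if_pos rfl]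
    constructor
    · intro h'
      injection h' with h'
      exact ⟨L, h'.symm, by omega, hL, by omega⟩
    · rintro ⟨jn, rfl, hlt, hocc, hno⟩
      have : jn = L := by
        by_contra hne
        exact hno L (by omega) (by omega) hL
      rw [this]
  · rw [if_neg hwv, h w j]
    constructor
    · rintro ⟨jn, rfl, hlt, hocc, hno⟩
      refine ⟨jn, rfl, by omega, hocc, fun m h1 h2 => ?_⟩
      by_cases hm : m = L
      · subst hm
        rw [hL]
        intro he
        injection he with he
        exact hwv he.symm
      · exact hno m h1 (by omega)
    · rintro ⟨jn, rfl, hlt, hocc, hno⟩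
      have hjn : jn ≠ L := by
        intro he
        rw [he, hL] at hocc
        injection hocc with hocc
        exact hwv hocc.symm
      exact ⟨jn, rfl, by omega, hocc, fun m h1 h2 => hno m h1 (by omega)⟩

lemma exists_lastocc (arr : List Int) (v : Int) :
    ∀ (L m : Nat), m < L → arr[m]? = some v →
    ∃ jn : Nat, jn < L ∧ arr[jn]? = some v ∧
      ∀ m' : Nat, jn < m' → m' < L → arr[m']? ≠ some v := by
  intro L
  induction L with
  | zero => omega
  | succ L ihL =>
    intro m hm hv
    by_cases hL : arr[L]? = some v
    · exact ⟨L, by omega, hL, by omega⟩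
    · have hm' : m < L := by
        rcases Nat.lt_succ_iff_lt_or_eq.mp hm with h | h
        · exact h
        · exact absurd (h ▸ hv) hL
      obtain ⟨jn, h1, h2, h3⟩ := ihL m hm' hv
      refine ⟨jn, by omega, h2, fun m' a b => ?_⟩
      rcases Nat.lt_succ_iff_lt_or_eq.mp b with hb | hb
      · exact h3 m' a hb
      · subst hb
        exact hL

lemma last_get_of_occ {arr : List Int} {last : PySem.Dict Int Int} {L : Nat}
    (hI : LInv arr last L) {m : Nat} {v : Int} (hm : m < L) (hv : arr[m]? = some v) :
    ∃ jn : Nat, last.get? v = some ((jn : Nat) : Int) ∧ jn < L ∧ arr[jn]? = some v ∧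
      ∀ m' : Nat, jn < m' → m' < L → arr[m']? ≠ some v := by
  obtain ⟨jn, a, b, c⟩ := exists_lastocc arr v L m hm hv
  exact ⟨jn, (hI v jn).mpr ⟨jn, rfl, a, b, c⟩, a, b, c⟩

lemma advance_sim (arr rest : List Int) (L : Nat) (last : PySem.Dict Int Int)
    (hLr : arr.drop L = rest) (hLle : L ≤ arr.length) (hI : LInv arr last L) :
    ∀ (w : List Int) (p : Nat), w ≠ [] → arr.drop p = w ++ rest →
    kFrequentAdvance arr last p + 1 = p + (w.length - (kFrequentEvict w).1.length)
    ∧ PySem.List.pyGet? arr ((kFrequentAdvance arr last p : Nat) : Int)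
        = some (kFrequentEvict w).2 := by
  intro w
  induction w with
  | nil => intro p h; exact absurd rfl h
  | cons u w' ih =>
    intro p _ hdp
    have hpL : p + w'.length + 1 = L := by
      have h1 := congrArg List.length hdp
      have h2 := congrArg List.length hLr
      simp only [List.length_drop, List.length_append, List.length_cons] at h1 h2
      have h3 : p < arr.length := by
        by_contra h
        rw [List.drop_eq_nil_iff.mpr (by omega)] at hdp
        cases hdp
      omega
    have hget : PySem.List.pyGet? arr (p : Int) = some u := by
      rw [PySem.List.pyGet?_natCast]
      have h0 : (arr.drop p)[0]? = some u := by rw [hdp]; rfl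
      rwa [List.getElem?_drop, Nat.add_zero] at h0
    have harrp : arr[p]? = some u := by rwa [PySem.List.pyGet?_natCast] at hget
    have hdp' : arr.drop (p + 1) = w' ++ rest := by
      have h1 : (arr.drop p).drop 1 = arr.drop (p + 1) := by rw [List.drop_drop]
      rw [← h1, hdp]
      rfl
    obtain ⟨jn, hjget, hjlt, hjocc, hjno⟩ := last_get_of_occ hI (by omega) harrp
    have hmem_iff : u ∈ w' ↔ ∃ m : Nat, p < m ∧ m < L ∧ arr[m]? = some u := by
      constructor
      · intro hm
        obtain ⟨t, ht, htu⟩ := List.mem_iff_getElem.mp hm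
        refine ⟨p + 1 + t, by omega, by omega, ?_⟩
        have h0 : arr[p + 1 + t]? = (arr.drop (p + 1))[t]? := (List.getElem?_drop ..).symm
        rw [h0, hdp', List.getElem?_append_left ht, List.getElem?_eq_getElem ht, htu]
      · rintro ⟨m, h1, h2, h3⟩
        have ht : m - (p + 1) < w'.length := by omega
        have h0 : arr[m]? = (w' ++ rest)[m - (p + 1)]? := by
          rw [← hdp', List.getElem?_drop]
          congr 1
          omega
        rw [h0, List.getElem?_append_left ht] at h3
        exact List.mem_of_getElem? h3
    by_cases hmem : u ∈ w'
    · have hjnp : jn ≠ p := by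
        obtain ⟨m, hm1, hm2, hm3⟩ := hmem_iff.mp hmem
        intro he
        subst he
        exact hjno m hm1 hm2 hm3
      have hstep : kFrequentAdvance arr last p = kFrequentAdvance arr last (p + 1) := by
        rw [kFrequentAdvance]
        split
        · next h => rw [hget] at h; cases h
        · next u' h =>
          rw [hget] at h
          injection h with h
          subst h
          rw [hjget]
          simp only []
          rw [if_pos (show ((jn : Nat) : Int) ≠ ((p : Nat) : Int) from
            fun hh => hjnp (by exact_mod_cast hh))]
      have hev : kFrequentEvict (u :: w') = kFrequentEvict w' := by
        rw [kFrequentEvict, if_pos (by simpa using hmem)]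
      obtain ⟨e1, e2⟩ := ih (p + 1) (List.ne_nil_of_mem hmem) hdp'
      have hle := evict_len_le w'
      constructor
      · rw [hstep, hev]
        simp only [List.length_cons]
        omega
      · rw [hstep, hev]
        exact e2
    · have hjn : jn = p := by
        by_cases h1 : jn < p
        · exact absurd harrp (hjno p h1 (by omega))
        · by_cases h2 : jn = p
          · exact h2
          · exact absurd (hmem_iff.mpr ⟨jn, by omega, hjlt, hjocc⟩) hmem
      have hstop : kFrequentAdvance arr last p = p := by
        rw [kFrequentAdvance]
        split
        · next h => rfl
        · next u' h =>
          rw [hget] at h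
          injection h with h
          subst h
          rw [hjget]
          simp only []
          rw [if_neg (by simp [hjn])]
      have hev : kFrequentEvict (u :: w') = (w', u) := by
        rw [kFrequentEvict, if_neg (by simpa using hmem)]
      constructor
      · rw [hstop, hev]
        simp only [List.length_cons]
        omega
      · rw [hstop, hev]
        exact hget

lemma loop_sim (arr : List Int) (k : Int) (hk : 0 ≤ k) :
    ∀ (rest : List Int) (i start : Nat) (window order : List Int) (last : PySem.Dict Int Int),
    arr.drop i = rest →
    arr.drop start = window ++ rest →
    order.Nodup →
    (∀ x ∈ window, x ∈ order) →
    (∀ x ∈ order, 0 < window.count x) →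
    ((order.length : Int) ≤ k) →
    LInv arr last i →
    (kFrequentLoop arr k i start ⟨CntItems order window⟩).keys =
      ((PySem.List.enumerate rest (i : Int)).foldl (kFrequentStep arr k)
        (last, ⟨OItems order⟩, start)).2.1.keys := by
  intro rest
  induction rest with
  | nil =>
    intro i start window order last hdi hds hnd hsub hpos hlen hlast
    have hni : ¬ i < arr.length := by
      have := List.drop_eq_nil_iff.mp hdi
      omega
    rw [kFrequentLoop, dif_neg hni, cnt_keys, PySem.List.enumerate_nil, List.foldl_nil, okeys]
  | cons v rest' ih =>
    intro i start window order last hdi hds hnd hsub hpos hlen hlast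
    have hi : i < arr.length := by
      by_contra hni
      rw [List.drop_eq_nil_iff.mpr (by omega)] at hdi
      cases hdi
    have hv : arr[i] = v := by
      have h0 : (arr.drop i)[0]? = some v := by rw [hdi]; rfl
      rw [List.getElem?_drop, Nat.add_zero] at h0
      exact (List.getElem?_eq_some_iff.mp h0).2
    have harri : arr[i]? = some v := by
      rw [List.getElem?_eq_getElem hi, hv]
    have hdi' : arr.drop (i + 1) = rest' := by
      have h1 : (arr.drop i).drop 1 = arr.drop (i + 1) := by rw [List.drop_drop]
      rw [← h1, hdi]
      rfl
    have hds' : arr.drop start = (window ++ [v]) ++ rest' := by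
      rw [hds, List.append_assoc]
      rfl
    have hlast' : LInv arr (last.insert v (i : Int)) (i + 1) := LInv_insert harri hlast
    have henum : PySem.List.enumerate (v :: rest') (i : Int)
        = ((i : Int), v) :: PySem.List.enumerate rest' (((i + 1 : Nat)) : Int) := by
      rw [PySem.List.enumerate_cons]
      push_cast
      rfl
    rw [kFrequentLoop, dif_pos hi]
    simp only [hv]
    rw [henum, List.foldl_cons]
    by_cases hvo : v ∈ order
    · -- duplicate of a value already in the window: the dict cannot overflow
      rw [if_pos (cnt_contains_true window hvo), cnt_get? window hnd hvo]
      simp only []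
      rw [cnt_insert_succ window hvo,
        shrink_noop _ _ _ _ (by rw [cnt_size]; omega)]
      have hstep : kFrequentStep arr k (last, ⟨OItems order⟩, start) ((i : Int), v)
          = (last.insert v (i : Int), ⟨OItems order⟩, start) := by
        simp only [kFrequentStep]
        rw [if_pos (ocontains_true hvo)]
      rw [hstep]
      exact ih (i + 1) start (window ++ [v]) order _ hdi' hds' hnd
        (by
          intro x hx
          rcases List.mem_append.mp hx with hx | hx
          · exact hsub x hx
          · have hxv : x = v := List.mem_singleton.mp hx
            rw [hxv]
            exact hvo)
        (by
          intro x hx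
          have := hpos x hx
          rw [List.count_append]
          omega)
        hlen hlast'
    · -- genuinely new value: appended to the dict, may overflow
      have hvw : v ∉ window := fun hw => hvo (hsub v hw)
      have hnd' : (order ++ [v]).Nodup := by
        simp only [List.nodup_append, List.nodup_singleton, hnd, true_and]
        intro a ha b hb h
        rw [List.mem_singleton.mp hb] at h
        exact hvo (h ▸ ha)
      have happ : CntItems order window ++ [(v, 0)] = CntItems (order ++ [v]) window := by
        unfold CntItems
        rw [List.map_append]
        simp [List.count_eq_zero_of_not_mem hvw]
      have hvo' : v ∈ order ++ [v] := List.mem_append.mpr (Or.inr (List.mem_singleton.mpr rfl))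
      have hd0 : (PySem.Dict.mk (CntItems order window)).insert v 0
          = PySem.Dict.mk (CntItems (order ++ [v]) window) := by
        apply PySem.Dict.ext
        rw [PySem.Dict.items_insert_of_not_contains _ _ (cnt_contains_false window hvo)]
        exact happ
      have hsub' : ∀ x ∈ window ++ [v], x ∈ order ++ [v] := by
        intro x hx
        rcases List.mem_append.mp hx with hx | hx
        · exact List.mem_append.mpr (Or.inl (hsub x hx))
        · exact List.mem_append.mpr (Or.inr hx)
      have hpos' : ∀ x ∈ order ++ [v], 0 < (window ++ [v]).count x := by
        intro x hx
        rw [List.count_append]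
        rcases List.mem_append.mp hx with hx | hx
        · have := hpos x hx; omega
        · rw [List.mem_singleton.mp hx]
          simp
      have hl : (order ++ [v]).length = order.length + 1 := by simp
      rw [if_neg (by rw [cnt_contains_false window hvo]; simp), hd0,
        cnt_get? window hnd' hvo']
      simp only []
      rw [cnt_insert_succ window hvo']
      by_cases hov : ((order.length : Int) + 1 ≤ k)
      · -- still at most k distinct values: no shrinking
        rw [shrink_noop _ _ _ _ (by rw [cnt_size]; omega)]
        have hstep : kFrequentStep arr k (last, ⟨OItems order⟩, start) ((i : Int), v)
            = (last.insert v (i : Int), ⟨OItems (order ++ [v])⟩, start) := by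
          simp only [kFrequentStep]
          rw [if_neg (by rw [ocontains_false hvo]; simp), oinsert hvo,
            if_neg (by rw [osize]; omega)]
        rw [hstep]
        exact ih (i + 1) start (window ++ [v]) (order ++ [v]) _ hdi' hds' hnd' hsub' hpos'
          (by omega) hlast'
      · -- k+1 distinct values now: A shrinks, B advances the window start
        have hlen' : (((order ++ [v]).length : Nat) : Int) = k + 1 := by omega
        obtain ⟨e1, e2, e3, e4, e5⟩ :=
          shrink_sim arr rest' k hk (order ++ [v]) (window ++ [v]) start hds' hlen' hnd' hsub' hpos'
        obtain ⟨a1, a2⟩ := advance_sim arr rest' (i + 1) (last.insert v (i : Int)) hdi'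
          (by omega) hlast' (window ++ [v]) start (by simp) hds'
        have hstep : kFrequentStep arr k (last, ⟨OItems order⟩, start) ((i : Int), v)
            = (last.insert v (i : Int),
               ⟨OItems ((order ++ [v]).erase (kFrequentEvict (window ++ [v])).2)⟩,
               kFrequentAdvance arr (last.insert v (i : Int)) start + 1) := by
          simp only [kFrequentStep]
          rw [if_neg (by rw [ocontains_false hvo]; simp), oinsert hvo,
            if_pos (by rw [osize]; omega), a2]
          simp only []
          rw [oerase hnd']
        rw [e1, hstep, a1]
        exact ih (i + 1) _ _ _ _ hdi' e2 (List.Nodup.erase _ hnd') e4 e5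
          (by
            have := List.length_erase_of_mem e3
            have h1 : 1 ≤ (order ++ [v]).length := List.length_pos_of_mem e3
            omega)
          hlast'

-- ===== VERDICT (by name: the statement is the Claim_ definition above) =====
theorem kFrequent_spec : Claim_equal_kFrequent := by
  intro arr k _ hpre
  unfold Spec_kFrequent
  rcases hpre with rfl | hk
  · simp [kFrequent, kFrequent_alt, kFrequentLoop]
  · have h := loop_sim arr k hk arr 0 0 [] [] PySem.Dict.empty rfl rfl List.nodup_nil
      (by intro x hx; cases hx) (by intro x hx; cases hx) (by simpa using hk) (LInv_empty arr)
    simpa [kFrequent, kFrequent_alt, CntItems, OItems, PySem.Dict.empty] using h
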